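-- pv_equiv track=rewrite | github.com/PreciousMy/Prototipo-Impressora-Braille | testeVertical.py | preparar_dados_impressao
-- ===== SOURCE A (Python) =====
-- BRAILLE_MAP = {
--     'a': (1, 0, 0, 0, 0, 0), 'b': (1, 1, 0, 0, 0, 0), 'c': (1, 0, 0, 1, 0, 0),
--     'd': (1, 0, 0, 1, 1, 0), 'e': (1, 0, 0, 0, 1, 0), 'f': (1, 1, 0, 1, 0, 0),
--     'g': (1, 1, 0, 1, 1, 0), 'h': (1, 1, 0, 0, 1, 0), 'i': (0, 1, 0, 1, 0, 0),
--     'j': (0, 1, 0, 1, 1, 0), 'k': (1, 0, 1, 0, 0, 0), 'l': (1, 1, 1, 0, 0, 0),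
--     'm': (1, 0, 1, 1, 0, 0), 'n': (1, 0, 1, 1, 1, 0), 'o': (1, 0, 1, 0, 1, 0),
--     'p': (1, 1, 1, 1, 0, 0), 'q': (1, 1, 1, 1, 1, 0), 'r': (1, 1, 1, 0, 1, 0),
--     's': (0, 1, 1, 1, 0, 0), 't': (0, 1, 1, 1, 1, 0), 'u': (1, 0, 1, 0, 0, 1),
--     'v': (1, 1, 1, 0, 0, 1), 'w': (0, 1, 0, 1, 1, 1), 'x': (1, 0, 1, 1, 0, 1),
--     'y': (1, 0, 1, 1, 1, 1), 'z': (1, 0, 1, 0, 1, 1),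
--     ' ': (0, 0, 0, 0, 0, 0),
-- }
--
-- CMD_NO_PUNCH = 0
--
-- CMD_SPACE = 2
--
-- CMD_LINE_BREAK = 3
--
-- def preparar_dados_impressao(celulas_braille):
--
--     if not celulas_braille:
--         return []
--
--     comandos_finais = []
--     num_celulas = len(celulas_braille)
--
--
--     for i in range(2):
--
--         for idx, celula in enumerate(celulas_braille):
--
--             if i == 0:
--                 ponto_1_val = celula[2]
--                 ponto_2_val = celula[1]
--                 ponto_3_val = celula[0]
--             else:
--                 ponto_1_val = celula[5]
--                 ponto_2_val = celula[4]
--                 ponto_3_val = celula[3]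
--
--             if celula == BRAILLE_MAP[' ']:
--
--                 comandos_finais.append(CMD_NO_PUNCH)
--                 comandos_finais.append(CMD_NO_PUNCH)
--                 comandos_finais.append(CMD_NO_PUNCH)
--             else:
--
--                 comandos_finais.append(ponto_1_val)
--                 comandos_finais.append(ponto_2_val)
--                 comandos_finais.append(ponto_3_val)
--
--             if idx < num_celulas - 1:
--                 comandos_finais.append(CMD_SPACE)
--
--
--         if i < 1:
--             comandos_finais.append(CMD_LINE_BREAK)
--
--     return comandos_finais
-- ===== SOURCE B (Python) =====
-- CMD_NO_PUNCH = 0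
-- CMD_SPACE = 2
-- CMD_LINE_BREAK = 3
--
-- def preparar_dados_impressao(celulas_braille):
--     if not celulas_braille:
--         return []
--     fila_superior = []
--     fila_inferior = []
--     ultimo = len(celulas_braille) - 1
--     for idx, celula in enumerate(celulas_braille):
--         fila_superior += [celula[2], celula[1], celula[0]]
--         fila_inferior += [celula[5], celula[4], celula[3]]
--         if idx != ultimo:
--             fila_superior.append(CMD_SPACE)
--             fila_inferior.append(CMD_SPACE)
--     return fila_superior + [CMD_LINE_BREAK] + fila_inferior
-- ===== Notes on version B (the rewrite author's own statement) =====
-- stated objective: simpler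
-- what changed: One pass over the cells maintaining two row accumulators (top row, bottom row) joined with the line break at the end, instead of A's two sequential enumerate passes appending into one flat list; the redundant space-cell special case is dropped since the space cell is all zeros.
import Mathlib
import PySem

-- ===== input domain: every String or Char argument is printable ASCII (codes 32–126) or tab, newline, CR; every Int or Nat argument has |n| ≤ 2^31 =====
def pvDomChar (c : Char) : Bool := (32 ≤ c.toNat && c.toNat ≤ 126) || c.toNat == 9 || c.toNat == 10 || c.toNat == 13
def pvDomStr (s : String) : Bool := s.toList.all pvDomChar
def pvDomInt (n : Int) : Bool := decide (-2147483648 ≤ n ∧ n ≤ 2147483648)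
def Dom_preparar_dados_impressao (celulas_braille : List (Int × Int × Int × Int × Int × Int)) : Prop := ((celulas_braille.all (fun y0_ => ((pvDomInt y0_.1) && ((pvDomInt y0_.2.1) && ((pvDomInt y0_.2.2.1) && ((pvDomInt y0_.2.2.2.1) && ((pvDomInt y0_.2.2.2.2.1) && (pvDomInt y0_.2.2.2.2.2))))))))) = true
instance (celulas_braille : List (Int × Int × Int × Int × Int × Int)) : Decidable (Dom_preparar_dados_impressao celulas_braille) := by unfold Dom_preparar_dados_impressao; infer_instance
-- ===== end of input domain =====

-- B builds the two printer rows in one pass with two accumulators (and drops the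
-- redundant space-cell special case, which already yields three CMD_NO_PUNCH zeros),
-- instead of A's two sequential passes over the cells; objective: simpler.

-- ===== PORT A =====
-- body of A's inner 'for idx, celula in enumerate(celulas_braille)' loop, literal
def pvStepA (num_celulas i : Int) (comandos : List Int)
    (p : Int × (Int × Int × Int × Int × Int × Int)) : List Int :=
  let idx := p.1
  let celula := p.2
  let pontos : Int × Int × Int :=             -- (ponto_1_val, ponto_2_val, ponto_3_val)
    if i = 0 then (celula.2.2.1, celula.2.1, celula.1)
    else (celula.2.2.2.2.2, celula.2.2.2.2.1, celula.2.2.2.1)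
  let comandos :=
    if celula = (0, 0, 0, 0, 0, 0) then       -- BRAILLE_MAP[' ']
      comandos ++ [0] ++ [0] ++ [0]           -- CMD_NO_PUNCH, three appends
    else
      comandos ++ [pontos.1] ++ [pontos.2.1] ++ [pontos.2.2]
  if idx < num_celulas - 1 then comandos ++ [2] else comandos  -- CMD_SPACE

def preparar_dados_impressao (celulas_braille : List (Int × Int × Int × Int × Int × Int)) : List Int :=
  if celulas_braille = [] then []
  else
    let num_celulas : Int := celulas_braille.length
    (PySem.List.pyRange 0 2 1).foldl (fun comandos i =>
      let comandos := (PySem.List.enumerate celulas_braille).foldl (pvStepA num_celulas i) comandos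
      if i < 1 then comandos ++ [3] else comandos)  -- CMD_LINE_BREAK
      []

-- ===== PORT B =====
-- body of B's single loop: one step updates both row accumulators
def pvStepB (ultimo : Int) (st : List Int × List Int)
    (p : Int × (Int × Int × Int × Int × Int × Int)) : List Int × List Int :=
  (let sup := st.1 ++ [p.2.2.2.1, p.2.2.1, p.2.1]
   if p.1 ≠ ultimo then sup ++ [2] else sup,
   let inf := st.2 ++ [p.2.2.2.2.2.2, p.2.2.2.2.2.1, p.2.2.2.2.1]
   if p.1 ≠ ultimo then inf ++ [2] else inf)

def preparar_dados_impressao_alt (celulas_braille : List (Int × Int × Int × Int × Int × Int)) : List Int :=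
  if celulas_braille = [] then []
  else
    let ultimo : Int := (celulas_braille.length : Int) - 1
    let filas := (PySem.List.enumerate celulas_braille).foldl (pvStepB ultimo) ([], [])
    filas.1 ++ [3] ++ filas.2

-- ===== PRECONDITION & SPEC =====
def Spec_preparar_dados_impressao (celulas_braille : List (Int × Int × Int × Int × Int × Int)) (out : List Int) : Prop := out = preparar_dados_impressao_alt celulas_braille
instance (celulas_braille : List (Int × Int × Int × Int × Int × Int)) (out : List Int) : Decidable (Spec_preparar_dados_impressao celulas_braille out) := by unfold Spec_preparar_dados_impressao; infer_instance

-- ===== CLAIM (what is proved, stated in full; the proofs are below) =====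
def Claim_equal_preparar_dados_impressao : Prop := ∀ (celulas_braille : List (Int × Int × Int × Int × Int × Int)), Dom_preparar_dados_impressao celulas_braille → Spec_preparar_dados_impressao celulas_braille (preparar_dados_impressao celulas_braille)

-- ===== LEMMAS AND PROOFS =====

-- per-cell commands of A's pass i
def pvCellA (n i : Int) (p : Int × (Int × Int × Int × Int × Int × Int)) : List Int :=
  (if p.2 = (0, 0, 0, 0, 0, 0) then [0, 0, 0]
   else if i = 0 then [p.2.2.2.1, p.2.2.1, p.2.1]
   else [p.2.2.2.2.2.2, p.2.2.2.2.2.1, p.2.2.2.2.1]) ++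
  (if p.1 < n - 1 then [2] else [])

-- per-cell commands of B's two rows
def pvCellSup (u : Int) (p : Int × (Int × Int × Int × Int × Int × Int)) : List Int :=
  [p.2.2.2.1, p.2.2.1, p.2.1] ++ (if p.1 ≠ u then [2] else [])
def pvCellInf (u : Int) (p : Int × (Int × Int × Int × Int × Int × Int)) : List Int :=
  [p.2.2.2.2.2.2, p.2.2.2.2.2.1, p.2.2.2.2.1] ++ (if p.1 ≠ u then [2] else [])

lemma pvStepA_eq (n i : Int) :
    pvStepA n i = fun acc p => acc ++ pvCellA n i p := by
  funext acc p
  simp only [pvStepA, pvCellA]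
  split_ifs <;> simp

lemma pvStepB_eq (u : Int) :
    pvStepB u = fun (st : List Int × List Int) p =>
      (st.1 ++ pvCellSup u p, st.2 ++ pvCellInf u p) := by
  funext st p
  simp only [pvStepB, pvCellSup, pvCellInf]
  split_ifs <;> simp

lemma pvIdx_bounds {p : Int × (Int × Int × Int × Int × Int × Int)}
    {cs : List (Int × Int × Int × Int × Int × Int)}
    (h : p ∈ PySem.List.enumerate cs 0) : 0 ≤ p.1 ∧ p.1 < (cs.length : Int) := by
  have h1 : p.1 ∈ (PySem.List.enumerate cs 0).map (fun x => x.1) := List.mem_map_of_mem h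
  rw [PySem.List.map_fst_enumerate] at h1
  simpa using (PySem.List.mem_pyRange_one.mp (by simpa using h1))

lemma pvCellA_eq_sup (n : Int) (p : Int × (Int × Int × Int × Int × Int × Int))
    (hb : 0 ≤ p.1 ∧ p.1 < n) : pvCellA n 0 p = pvCellSup (n - 1) p := by
  obtain ⟨idx, c1, c2, c3, c4, c5, c6⟩ := p
  simp only [pvCellA, pvCellSup] at *
  have hiff : (idx < n - 1) ↔ (idx ≠ n - 1) := by omega
  by_cases hz : (c1, c2, c3, c4, c5, c6) = ((0 : Int), (0 : Int), (0 : Int), (0 : Int), (0 : Int), (0 : Int))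
  · obtain ⟨h1, h2, h3, h4, h5, h6⟩ : c1 = 0 ∧ c2 = 0 ∧ c3 = 0 ∧ c4 = 0 ∧ c5 = 0 ∧ c6 = 0 := by
      simpa [Prod.ext_iff] using hz
    subst h1; subst h2; subst h3; subst h4; subst h5; subst h6
    simp [hiff]
  · simp [hz, hiff]

lemma pvCellA_eq_inf (n : Int) (p : Int × (Int × Int × Int × Int × Int × Int))
    (hb : 0 ≤ p.1 ∧ p.1 < n) : pvCellA n 1 p = pvCellInf (n - 1) p := by
  obtain ⟨idx, c1, c2, c3, c4, c5, c6⟩ := p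
  simp only [pvCellA, pvCellInf] at *
  have hiff : (idx < n - 1) ↔ (idx ≠ n - 1) := by omega
  by_cases hz : (c1, c2, c3, c4, c5, c6) = ((0 : Int), (0 : Int), (0 : Int), (0 : Int), (0 : Int), (0 : Int))
  · obtain ⟨h1, h2, h3, h4, h5, h6⟩ : c1 = 0 ∧ c2 = 0 ∧ c3 = 0 ∧ c4 = 0 ∧ c5 = 0 ∧ c6 = 0 := by
      simpa [Prod.ext_iff] using hz
    subst h1; subst h2; subst h3; subst h4; subst h5; subst h6
    simp [hiff]
  · simp [hz, hiff]

-- ===== VERDICT (by name: the statement is the Claim_ definition above) =====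
theorem preparar_dados_impressao_spec : Claim_equal_preparar_dados_impressao := by
  intro cs _
  unfold Spec_preparar_dados_impressao preparar_dados_impressao preparar_dados_impressao_alt
  by_cases hnil : cs = []
  · simp [hnil]
  · have hr : PySem.List.pyRange 0 2 1 = [0, 1] := by decide
    simp only [hnil, ite_false, hr, List.foldl_cons, List.foldl_nil,
      pvStepA_eq, pvStepB_eq, PySem.List.foldl_append_eq_flatMap]
    have hS : (PySem.List.enumerate cs).flatMap (pvCellA (cs.length : Int) 0)
        = (PySem.List.enumerate cs).flatMap (pvCellSup ((cs.length : Int) - 1)) :=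
      List.flatMap_congr (fun p hp => pvCellA_eq_sup _ p (pvIdx_bounds hp))
    have hI : (PySem.List.enumerate cs).flatMap (pvCellA (cs.length : Int) 1)
        = (PySem.List.enumerate cs).flatMap (pvCellInf ((cs.length : Int) - 1)) :=
      List.flatMap_congr (fun p hp => pvCellA_eq_inf _ p (pvIdx_bounds hp))
    rw [PySem.List.foldl_prod_mk (fun (s : List Int) e => s ++ pvCellSup ((cs.length : Int) - 1) e)
      (fun (s : List Int) e => s ++ pvCellInf ((cs.length : Int) - 1) e)
      (PySem.List.enumerate cs) [] []]
    simp [hS, hI, List.flatMap_def]
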